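-- pv_equiv track=rewrite | github.com/MaurizioB/NoLaE | const.py | get_fullscale
-- ===== SOURCE A (Python) =====
-- def get_fullscale(base, copy = True):
--     copy = 4 if copy else 0
--     scale = []
--     div = 128//(len(base))
--     for value in base:
--         scale.extend([value+copy for x in range(div)])
--     while len(scale) < 128:
--         scale.append(base[-1])
--     return scale
-- ===== SOURCE B (Python) =====
-- def get_fullscale(base, copy=True):
--     c = 4 if copy else 0
--     div = 128 // len(base)
--     n = div * len(base)
--     return [base[i // div] + c if i < n else base[-1] for i in range(128)]
-- ===== Notes on version B (the rewrite author's own statement) =====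
-- stated objective: simpler
-- what changed: Replaces A's two-phase construction (outer loop over base values each extending div copies, then a while loop padding to 128) with a single uniform pass over all 128 output positions, each slot computed directly by one conditional formula (the offset source element selected by integer division below the threshold, the raw last element above it); there is no repetition construct and no separate padding phase, and repeated list growth disappears.
import Mathlib
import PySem

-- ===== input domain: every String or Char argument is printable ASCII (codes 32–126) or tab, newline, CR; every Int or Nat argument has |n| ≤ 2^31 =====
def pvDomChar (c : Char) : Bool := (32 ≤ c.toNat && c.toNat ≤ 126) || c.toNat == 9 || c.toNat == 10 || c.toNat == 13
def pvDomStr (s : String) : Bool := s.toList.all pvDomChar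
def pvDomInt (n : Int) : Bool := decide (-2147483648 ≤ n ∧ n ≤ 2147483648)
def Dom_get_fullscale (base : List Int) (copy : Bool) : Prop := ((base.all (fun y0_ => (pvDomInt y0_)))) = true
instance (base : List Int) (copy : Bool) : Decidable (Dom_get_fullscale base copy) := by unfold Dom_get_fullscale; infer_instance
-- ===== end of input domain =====

-- B computes each of the 128 output slots directly by one conditional formula over its
-- index, replacing A's nested extend loop plus while-pad; objective: simpler.

-- ===== PORT A =====
-- the 'while len(scale) < 128: scale.append(base[-1])' loop
def pvPadA (last : Int) (scale : List Int) : List Int :=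
  if scale.length < 128 then pvPadA last (scale ++ [last]) else scale
termination_by 128 - scale.length
decreasing_by simp; omega

def get_fullscale (base : List Int) (copy : Bool) : List Int :=
  let c : Int := if copy then 4 else 0
  let div : Nat := 128 / base.length
  let scale : List Int :=
    base.foldl (fun acc value => acc ++ (List.range div).map (fun _ => value + c)) []
  pvPadA ((PySem.List.pyGet? base (-1)).getD 0) scale

-- ===== PORT B =====
def get_fullscale_alt (base : List Int) (copy : Bool) : List Int :=
  let c : Int := if copy then 4 else 0
  let div : Nat := 128 / base.length
  let n : Nat := div * base.length
  (List.range 128).map (fun i =>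
    if i < n then base.getD (i / div) 0 + c
    else (PySem.List.pyGet? base (-1)).getD 0)

-- ===== PRECONDITION & SPEC =====
-- A raises ZeroDivisionError on an empty base (128 // 0); B raises there too.
def Pre_get_fullscale (base : List Int) (copy : Bool) : Prop := base ≠ []
instance (base : List Int) (copy : Bool) : Decidable (Pre_get_fullscale base copy) := by unfold Pre_get_fullscale; infer_instance
def pvWitness_get_fullscale : List Int × Bool := ([0], true)

def Spec_get_fullscale (base : List Int) (copy : Bool) (out : List Int) : Prop := out = get_fullscale_alt base copy
instance (base : List Int) (copy : Bool) (out : List Int) : Decidable (Spec_get_fullscale base copy out) := by unfold Spec_get_fullscale; infer_instance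

-- ===== CLAIM (what is proved, stated in full; the proofs are below) =====
def Claim_equal_get_fullscale : Prop := ∀ (base : List Int) (copy : Bool), Dom_get_fullscale base copy → Pre_get_fullscale base copy → Spec_get_fullscale base copy (get_fullscale base copy)

-- ===== LEMMAS AND PROOFS =====

-- A's extend loop equals a flatMap of replicated blocks
theorem foldA_eq_flatMap (c : Int) (div : Nat) (base : List Int) :
    base.foldl (fun acc value => acc ++ (List.range div).map (fun _ => value + c)) []
      = base.flatMap (fun v => List.replicate div (v + c)) := by
  rw [PySem.List.foldl_append_eq_flatMap]
  simp [List.map_const']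

-- the flatMap of replicated blocks equals an index-division pass over range (len*div)
theorem flatMap_eq_rangeMap (c : Int) (div : Nat) (base : List Int) :
    base.flatMap (fun v => List.replicate div (v + c))
      = (List.range (base.length * div)).map (fun i => (base.getD (i / div) 0) + c) := by
  induction base with
  | nil => simp
  | cons v bs ih =>
    rcases Nat.eq_zero_or_pos div with h0 | hpos
    · simp [h0]
    · have hlen : (v :: bs).length * div = div + bs.length * div := by
        simp [List.length_cons]; ring
      rw [List.flatMap_cons, ih, hlen, List.range_add, List.map_append, List.map_map]
      congr 1
      · have : ∀ i ∈ List.range div, (v :: bs).getD (i / div) 0 + c = v + c := by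
          intro i hi
          rw [Nat.div_eq_of_lt (List.mem_range.mp hi)]
          rfl
        rw [List.map_congr_left this]
        simp [List.map_const']
      · apply List.map_congr_left
        intro k _
        simp only [Function.comp_apply]
        have : (div + k) / div = k / div + 1 := by
          rw [Nat.add_comm, Nat.add_div_right _ hpos]
        rw [this]
        rfl

-- the while-pad loop equals appending a replicate
theorem pvPadA_eq (last : Int) (scale : List Int) :
    pvPadA last scale = scale ++ List.replicate (128 - scale.length) last := by
  fun_induction pvPadA last scale with
  | case1 scale h ih =>
    rw [ih]
    have h2 : 128 - scale.length = (128 - (scale ++ [last]).length) + 1 := by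
      simp; omega
    rw [h2, List.replicate_succ, List.append_assoc]
    rfl
  | case2 scale h =>
    have : 128 - scale.length = 0 := by omega
    simp [this]

theorem get_fullscale_spec : Claim_equal_get_fullscale := by
  intro base copy _ hpre
  unfold Spec_get_fullscale get_fullscale get_fullscale_alt
  dsimp only
  rw [foldA_eq_flatMap, flatMap_eq_rangeMap, pvPadA_eq]
  set c : Int := if copy then 4 else 0 with hc
  set div : Nat := 128 / base.length with hdiv
  set last : Int := (PySem.List.pyGet? base (-1)).getD 0 with hlast
  have hn : base.length * div ≤ 128 := by
    rw [hdiv, Nat.mul_comm]; exact Nat.div_mul_le_self 128 base.length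
  have hsplit : (128 : Nat) = base.length * div + (128 - base.length * div) := by omega
  have hlen : ((List.range (base.length * div)).map
      (fun i => base.getD (i / div) 0 + c)).length = base.length * div := by simp
  rw [hlen, hsplit, List.range_add, List.map_append, List.map_map]
  rw [Nat.mul_comm div base.length]
  congr 1
  · apply List.map_congr_left
    intro i hi
    rw [if_pos (List.mem_range.mp hi)]
  · have : ∀ k ∈ List.range (128 - base.length * div),
        ((fun i => if i < base.length * div then base.getD (i / div) 0 + c else last) ∘
          (fun x => base.length * div + x)) k = last := by
      intro k _
      simp only [Function.comp_apply]
      rw [if_neg (by omega)]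
    rw [List.map_congr_left this]
    simp [List.map_const']
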